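-- pv_equiv track=rewrite | github.com/Galaktikkon/ToC | lab8/utils/trace.py | get_dependency_set
-- ===== SOURCE A (Python) =====
-- def get_dependency_set(
--     S: set[str],
-- ) -> set[tuple[str, str]]:
--
--     D: set[tuple[str, str]] = set()
--
--     for x in S:
--         for y in S:
--             match x[0], y[0]:
--                 case "A", "C":
--                     if x[1:] == y[2:]:
--                         D.add((x, y))
--                         D.add((y, x))
--                     if x[1] == y[2] == y[3]:
--                         D.add((x, y))
--                         D.add((y, x))
--                 case "A", "B":
--                     if x[1] == y[1] and x[2] == y[3]:
--                         D.add((x, y))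
--                         D.add((y, x))
--                 case "B", "C":
--                     if x[1] == y[3] and x[2] == y[2]:
--                         D.add((x, y))
--                         D.add((y, x))
--                     if x[1:] == y[1:]:
--                         D.add((x, y))
--                         D.add((y, x))
--                 case "C", "C":
--                     if x[2:] == y[2:]:
--                         D.add((x, y))
--                         D.add((y, x))
--     return D
-- ===== SOURCE B (Python) =====
-- # Hash-join re-implementation: bucket the strings once by the substring keys each
-- # rule compares on, then enumerate only the matching pairs (one pass + lookups
-- # instead of A's double scan over all pairs).
--
-- def _index(pairs):
--     d = {}
--     for k, it in pairs:
--         d.setdefault(k, []).append(it)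
--     return d
--
--
-- def _buckets(E):
--     # buckets over the C / B strings, keyed by the substrings the rules compare
--     iAC = _index([(y[2:], (i, y)) for i, y in E if y[:1] == "C"])
--     iEq = _index([(y[2:3], (i, y)) for i, y in E
--                   if y[:1] == "C" and len(y) >= 4 and y[2] == y[3]])
--     iAB = _index([((y[1:2], y[3:4]), (i, y)) for i, y in E if y[:1] == "B"])
--     iBC1 = _index([((y[3:4], y[2:3]), (i, y)) for i, y in E if y[:1] == "C"])
--     iBC2 = _index([(y[1:], (i, y)) for i, y in E if y[:1] == "C"])
--     return (iAC, iEq, iAB, iBC1, iBC2)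
--
--
-- def _merge(u, v):  # merge two index-sorted candidate lists, dropping duplicate indices
--     out, a, b = [], 0, 0
--     while a < len(u) and b < len(v):
--         if u[a][0] < v[b][0]:
--             out.append(u[a]); a += 1
--         elif v[b][0] < u[a][0]:
--             out.append(v[b]); b += 1
--         else:
--             out.append(u[a]); a += 1; b += 1
--     out.extend(u[a:]); out.extend(v[b:])
--     return out
--
--
-- def _cands(b, x):
--     (iAC, iEq, iAB, iBC1, iBC2) = b
--     t = x[:1]
--     if t == "A":
--         return _merge(_merge(iAC.get(x[1:], []), iEq.get(x[1:2], [])),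
--                       iAB.get((x[1:2], x[2:3]), []))
--     elif t == "B":
--         return _merge(iBC1.get((x[1:2], x[2:3]), []), iBC2.get(x[1:], []))
--     elif t == "C":
--         return iAC.get(x[2:], [])
--     else:
--         return []
--
--
-- def get_dependency_set(
--     S: set[str],
-- ) -> set[tuple[str, str]]:
--     b = _buckets(list(enumerate(S)))
--     D: set[tuple[str, str]] = set()
--     for x in S:
--         for _, y in _cands(b, x):
--             D.add((x, y))
--             D.add((y, x))
--     return D
-- ===== Notes on version B (the rewrite author's own statement) =====
-- stated objective: faster
-- what changed: A's O(n^2) scan over all ordered pairs is replaced by a hash join: one pass buckets the B/C strings in dicts keyed by the substrings each rule compares on, and for each string its partners come from dict lookups (merged in index order), so only matching pairs are enumerated.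
import Mathlib
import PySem

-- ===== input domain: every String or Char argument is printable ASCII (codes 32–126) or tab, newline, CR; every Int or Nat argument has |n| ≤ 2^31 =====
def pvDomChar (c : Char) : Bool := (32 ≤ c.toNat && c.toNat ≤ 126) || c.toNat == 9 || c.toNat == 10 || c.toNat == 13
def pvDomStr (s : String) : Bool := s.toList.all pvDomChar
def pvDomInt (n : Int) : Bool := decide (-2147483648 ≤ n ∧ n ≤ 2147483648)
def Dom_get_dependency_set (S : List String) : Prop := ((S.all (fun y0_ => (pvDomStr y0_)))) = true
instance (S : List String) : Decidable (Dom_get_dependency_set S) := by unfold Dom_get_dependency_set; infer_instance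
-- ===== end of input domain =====

-- B replaces A's double scan over all pairs by a hash join: one pass buckets the
-- strings by the substring keys the rules compare on, then only matching pairs are
-- enumerated (objective: faster).  Python str keys are modelled as their char lists
-- (PySem string primitives are defined on List Char).

-- ===== PORT A =====
-- D.add((x, y)); D.add((y, x))
def aAdd2 (D : PySem.Set (String × String)) (x y : String) : PySem.Set (String × String) :=
  PySem.Set.add (PySem.Set.add D (x, y)) (y, x)

-- one inner-loop body: match x[0], y[0] with the four cases and their if-adds
def pvStepA (D : PySem.Set (String × String)) (x y : String) : PySem.Set (String × String) :=
  match (x.toList)[0]?, (y.toList)[0]? with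
  | some 'A', some 'C' =>
    let D1 := if PySem.List.slice x.toList (some 1) none = PySem.List.slice y.toList (some 2) none
              then aAdd2 D x y else D
    if (x.toList)[1]? = (y.toList)[2]? ∧ (y.toList)[2]? = (y.toList)[3]?
    then aAdd2 D1 x y else D1
  | some 'A', some 'B' =>
    if (x.toList)[1]? = (y.toList)[1]? ∧ (x.toList)[2]? = (y.toList)[3]?
    then aAdd2 D x y else D
  | some 'B', some 'C' =>
    let D1 := if (x.toList)[1]? = (y.toList)[3]? ∧ (x.toList)[2]? = (y.toList)[2]?
              then aAdd2 D x y else D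
    if PySem.List.slice x.toList (some 1) none = PySem.List.slice y.toList (some 1) none
    then aAdd2 D1 x y else D1
  | some 'C', some 'C' =>
    if PySem.List.slice x.toList (some 2) none = PySem.List.slice y.toList (some 2) none
    then aAdd2 D x y else D
  | _, _ => D

def get_dependency_set (S : List String) : List (String × String) :=
  S.foldl (fun D x => S.foldl (fun D y => pvStepA D x y) D) PySem.Set.empty

-- ===== PORT B =====
-- def _index(pairs): d = {}; for k, it in pairs: d.setdefault(k, []).append(it); return d
def pvIndex {κ : Type} [BEq κ] (pairs : List (κ × (Int × String))) :
    PySem.Dict κ (List (Int × String)) :=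
  pairs.foldl (fun d p => d.modify p.1 [] (fun v => v ++ [p.2])) PySem.Dict.empty

-- def _buckets(E): the five dicts, keyed by the substrings the rules compare
def pvBuckets (E : List (Int × String)) :
    PySem.Dict (List Char) (List (Int × String)) ×
    PySem.Dict (List Char) (List (Int × String)) ×
    PySem.Dict (List Char × List Char) (List (Int × String)) ×
    PySem.Dict (List Char × List Char) (List (Int × String)) ×
    PySem.Dict (List Char) (List (Int × String)) :=
  (pvIndex ((E.filter (fun p => PySem.List.slice p.2.toList none (some 1) == ['C'])).map
      (fun p => (PySem.List.slice p.2.toList (some 2) none, p))),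
   pvIndex ((E.filter (fun p => PySem.List.slice p.2.toList none (some 1) == ['C']
        && decide (4 ≤ p.2.toList.length) && (p.2.toList)[2]? == (p.2.toList)[3]?)).map
      (fun p => (PySem.List.slice p.2.toList (some 2) (some 3), p))),
   pvIndex ((E.filter (fun p => PySem.List.slice p.2.toList none (some 1) == ['B'])).map
      (fun p => ((PySem.List.slice p.2.toList (some 1) (some 2),
                  PySem.List.slice p.2.toList (some 3) (some 4)), p))),
   pvIndex ((E.filter (fun p => PySem.List.slice p.2.toList none (some 1) == ['C'])).map
      (fun p => ((PySem.List.slice p.2.toList (some 3) (some 4),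
                  PySem.List.slice p.2.toList (some 2) (some 3)), p))),
   pvIndex ((E.filter (fun p => PySem.List.slice p.2.toList none (some 1) == ['C'])).map
      (fun p => (PySem.List.slice p.2.toList (some 1) none, p))))

-- def _merge(u, v): merge two index-sorted candidate lists, dropping duplicate indices
def pvMerge : List (Int × String) → List (Int × String) → List (Int × String)
  | [], v => v
  | u, [] => u
  | a :: u, b :: v =>
    if a.1 < b.1 then a :: pvMerge u (b :: v)
    else if b.1 < a.1 then b :: pvMerge (a :: u) v
    else a :: pvMerge u v
  termination_by u v => u.length + v.length

-- def _cands(b, x): look up x's partners in the buckets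
def pvCands
    (b : PySem.Dict (List Char) (List (Int × String)) ×
         PySem.Dict (List Char) (List (Int × String)) ×
         PySem.Dict (List Char × List Char) (List (Int × String)) ×
         PySem.Dict (List Char × List Char) (List (Int × String)) ×
         PySem.Dict (List Char) (List (Int × String)))
    (x : String) : List (Int × String) :=
  let xs := x.toList
  if PySem.List.slice xs none (some 1) == ['A'] then
    pvMerge (pvMerge (b.1.getD (PySem.List.slice xs (some 1) none) [])
                     (b.2.1.getD (PySem.List.slice xs (some 1) (some 2)) []))
            (b.2.2.1.getD ((PySem.List.slice xs (some 1) (some 2),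
                            PySem.List.slice xs (some 2) (some 3))) [])
  else if PySem.List.slice xs none (some 1) == ['B'] then
    pvMerge (b.2.2.2.1.getD ((PySem.List.slice xs (some 1) (some 2),
                              PySem.List.slice xs (some 2) (some 3))) [])
            (b.2.2.2.2.getD (PySem.List.slice xs (some 1) none) [])
  else if PySem.List.slice xs none (some 1) == ['C'] then
    b.1.getD (PySem.List.slice xs (some 2) none) []
  else []

def get_dependency_set_alt (S : List String) : List (String × String) :=
  let b := pvBuckets (PySem.List.enumerate S 0)
  S.foldl (fun D x =>
    (pvCands b x).foldl (fun D p => PySem.Set.add (PySem.Set.add D (x, p.2)) (p.2, x)) D)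
    PySem.Set.empty

-- ===== PRECONDITION & SPEC =====
-- per-pair lengths A's inner body needs to avoid an IndexError on the pair (x, y),
-- following the short-circuit evaluation of its conditions
def pvPairOK (x y : String) : Prop :=
  ((x.toList)[0]? = some 'A' → (y.toList)[0]? = some 'C' →
     2 ≤ x.toList.length ∧ 3 ≤ y.toList.length ∧
       ((x.toList)[1]? = (y.toList)[2]? → 4 ≤ y.toList.length)) ∧
  ((x.toList)[0]? = some 'A' → (y.toList)[0]? = some 'B' →
     2 ≤ x.toList.length ∧ 2 ≤ y.toList.length ∧
       ((x.toList)[1]? = (y.toList)[1]? → 3 ≤ x.toList.length ∧ 4 ≤ y.toList.length)) ∧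
  ((x.toList)[0]? = some 'B' → (y.toList)[0]? = some 'C' →
     2 ≤ x.toList.length ∧ 4 ≤ y.toList.length ∧
       ((x.toList)[1]? = (y.toList)[3]? → 3 ≤ x.toList.length))

-- Pre_ excludes exactly the inputs on which A hits an IndexError: an empty string
-- (x[0]/y[0]), or a pair of strings whose first chars select a match case but which
-- are too short for the character comparisons that case actually evaluates
def Pre_get_dependency_set (S : List String) : Prop :=
  ∀ x ∈ S, x.toList ≠ [] ∧ ∀ y ∈ S, pvPairOK x y
instance (S : List String) : Decidable (Pre_get_dependency_set S) := by
  unfold Pre_get_dependency_set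
  letI : ∀ x y : String, Decidable (pvPairOK x y) := fun x y => by
    unfold pvPairOK
    refine @instDecidableAnd _ _ ?_ (@instDecidableAnd _ _ ?_ ?_) <;> infer_instance
  infer_instance

def pvWitness_get_dependency_set : List String := ["Aab", "Cxab", "Babc", "Cabb", "zz"]

def Spec_get_dependency_set (S : List String) (out : List (String × String)) : Prop :=
  out = get_dependency_set_alt S
instance (S : List String) (out : List (String × String)) : Decidable (Spec_get_dependency_set S out) := by
  unfold Spec_get_dependency_set; infer_instance

-- ===== CLAIM (what is proved, stated in full; the proofs are below) =====
def Claim_equal_get_dependency_set : Prop :=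
  ∀ (S : List String), Dom_get_dependency_set S → Pre_get_dependency_set S →
    Spec_get_dependency_set S (get_dependency_set S)

-- ===== LEMMAS AND PROOFS =====

-- set facts
theorem pvAdd_of_mem {α : Type} [BEq α] [LawfulBEq α] (s : PySem.Set α) (a : α) (h : a ∈ s) :
    s.add a = s := by
  simp [PySem.Set.add, PySem.Set.contains, h]

theorem aAdd2_idem (D : PySem.Set (String × String)) (x y : String) :
    aAdd2 (aAdd2 D x y) x y = aAdd2 D x y := by
  unfold aAdd2
  rw [pvAdd_of_mem, pvAdd_of_mem]
  · simp [PySem.Set.mem_add]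
  · rw [pvAdd_of_mem] <;> simp [PySem.Set.mem_add]

-- merge facts
theorem pvMerge_nil_left (v : List (Int × String)) : pvMerge [] v = v := by
  cases v <;> simp [pvMerge]

theorem pvMerge_nil_right (u : List (Int × String)) : pvMerge u [] = u := by
  cases u <;> simp [pvMerge]

theorem pvMerge_cons_left (a : Int × String) (u v : List (Int × String))
    (h : ∀ b ∈ v, a.1 < b.1) : pvMerge (a :: u) v = a :: pvMerge u v := by
  cases v with
  | nil => simp [pvMerge_nil_right]
  | cons b v => simp [pvMerge, h b (by simp)]

theorem pvMerge_cons_right (b : Int × String) (u v : List (Int × String))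
    (h : ∀ a ∈ u, b.1 < a.1) : pvMerge u (b :: v) = b :: pvMerge u v := by
  cases u with
  | nil => simp [pvMerge_nil_left]
  | cons a u =>
    have h1 := h a (by simp)
    simp [pvMerge, h1, lt_asymm h1]

-- merging two filters of an index-sorted list is the filter of the disjunction
theorem pvMerge_filter (p q : (Int × String) → Bool) (l : List (Int × String))
    (h : l.Pairwise (fun a b => a.1 < b.1)) :
    pvMerge (l.filter p) (l.filter q) = l.filter (fun e => p e || q e) := by
  induction l with
  | nil => simp [pvMerge]
  | cons e l ih =>
    rcases List.pairwise_cons.mp h with ⟨he, hl⟩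
    by_cases hp : p e <;> by_cases hq : q e <;>
      simp only [List.filter_cons, hp, hq, Bool.true_or, Bool.false_or, Bool.or_self,
        Bool.false_eq_true, ite_true, ite_false]
    · rw [pvMerge]; simp [ih hl]
    · rw [pvMerge_cons_left e _ _ (fun b hb => he b (List.mem_of_mem_filter hb))]
      rw [ih hl]
    · rw [pvMerge_cons_right e _ _ (fun a ha => he a (List.mem_of_mem_filter ha))]
      rw [ih hl]
    · exact ih hl

-- an index bucket holds exactly the filtered, key-matching items, in order
theorem pvIndex_getD {κ : Type} [BEq κ] [LawfulBEq κ] (E : List (Int × String))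
    (c : (Int × String) → Bool) (k : (Int × String) → κ) (key : κ) :
    (pvIndex ((E.filter c).map (fun p => (k p, p)))).getD key [] =
      E.filter (fun p => c p && (k p == key)) := by
  unfold pvIndex
  rw [PySem.Dict.getD_foldl_modify_append]
  simp [List.filter_map, Function.comp_def, List.filter_filter]
  exact List.filter_congr (fun p _ => Bool.and_comm _ _)

theorem enum_filter_map_snd (f : String → Bool) (S : List String) : ∀ n : Int,
    ((PySem.List.enumerate S n).filter (fun p => f p.2)).map (fun p => p.2) = S.filter f := by
  induction S with
  | nil => intro n; simp [PySem.List.enumerate]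
  | cons s S ih =>
    intro n
    by_cases h : f s <;> simp [PySem.List.enumerate_cons, h, ih]

theorem mem_snd_of_mem_enum (S : List String) (n : Int) (p : Int × String)
    (h : p ∈ PySem.List.enumerate S n) : p.2 ∈ S := by
  have := PySem.List.map_snd_enumerate S n
  exact this ▸ List.mem_map_of_mem h

-- single-char slice helpers
theorem take_one_eq_singleton_iff (xs : List Char) (c : Char) :
    (xs.take 1 = [c]) ↔ xs[0]? = some c := by
  cases xs <;> simp

theorem take_one_drop (xs : List Char) (i : Nat) (h : i < xs.length) :
    (xs.drop i).take 1 = xs[i]?.toList := by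
  rw [List.drop_eq_getElem_cons h, List.getElem?_eq_getElem h]
  rfl

theorem take_one_drop_eq_iff (xs ys : List Char) (i j : Nat)
    (hi : i < xs.length) (hj : j < ys.length) :
    ((xs.drop i).take 1 = (ys.drop j).take 1) ↔ xs[i]? = ys[j]? := by
  rw [take_one_drop _ _ hi, take_one_drop _ _ hj]
  simp [List.getElem?_eq_getElem hi, List.getElem?_eq_getElem hj]

-- A's combined per-pair condition, as one Bool
def pvQA (x y : String) : Bool :=
  if (x.toList)[0]? = some 'A' then
    if (y.toList)[0]? = some 'C' then
      decide (PySem.List.slice x.toList (some 1) none = PySem.List.slice y.toList (some 2) none)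
      || (decide ((x.toList)[1]? = (y.toList)[2]?) && decide ((y.toList)[2]? = (y.toList)[3]?))
    else if (y.toList)[0]? = some 'B' then
      decide ((x.toList)[1]? = (y.toList)[1]?) && decide ((x.toList)[2]? = (y.toList)[3]?)
    else false
  else if (x.toList)[0]? = some 'B' then
    if (y.toList)[0]? = some 'C' then
      (decide ((x.toList)[1]? = (y.toList)[3]?) && decide ((x.toList)[2]? = (y.toList)[2]?))
      || decide (PySem.List.slice x.toList (some 1) none = PySem.List.slice y.toList (some 1) none)
    else false
  else if (x.toList)[0]? = some 'C' then
    if (y.toList)[0]? = some 'C' then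
      decide (PySem.List.slice x.toList (some 2) none = PySem.List.slice y.toList (some 2) none)
    else false
  else false

theorem pvStepA_eq (D : PySem.Set (String × String)) (x y : String) :
    pvStepA D x y = if pvQA x y then aAdd2 D x y else D := by
  unfold pvStepA pvQA
  split
  · rename_i hx hy
    by_cases h1 : PySem.List.slice x.toList (some 1) none = PySem.List.slice y.toList (some 2) none <;>
      by_cases h2 : (x.toList)[1]? = (y.toList)[2]? ∧ (y.toList)[2]? = (y.toList)[3]? <;>
      simp [hx, hy, h1, h2, aAdd2_idem]
  · rename_i hx hy
    by_cases h1 : (x.toList)[1]? = (y.toList)[1]? ∧ (x.toList)[2]? = (y.toList)[3]? <;>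
      simp [hx, hy, h1]
  · rename_i hx hy
    by_cases h1 : (x.toList)[1]? = (y.toList)[3]? ∧ (x.toList)[2]? = (y.toList)[2]? <;>
      by_cases h2 : PySem.List.slice x.toList (some 1) none = PySem.List.slice y.toList (some 1) none <;>
      simp [hx, hy, h1, h2, aAdd2_idem]
  · rename_i hx hy
    by_cases h1 : PySem.List.slice x.toList (some 2) none = PySem.List.slice y.toList (some 2) none <;>
      simp [hx, hy, h1]
  · rename_i hAC hAB hBC hCC
    by_cases hxA : x.toList[0]? = some 'A' <;> by_cases hxB : x.toList[0]? = some 'B' <;>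
      by_cases hxC : x.toList[0]? = some 'C' <;> by_cases hyB : y.toList[0]? = some 'B' <;>
      by_cases hyC : y.toList[0]? = some 'C' <;>
      simp_all

-- numeral slice normal forms
theorem slice01 (xs : List Char) : PySem.List.slice xs none (some 1) = xs.take 1 := by
  rw [PySem.List.slice_to _ (by norm_num)]; rfl
theorem slice1n (xs : List Char) : PySem.List.slice xs (some 1) none = xs.drop 1 := by
  rw [PySem.List.slice_from _ (by norm_num)]; rfl
theorem slice2n (xs : List Char) : PySem.List.slice xs (some 2) none = xs.drop 2 := by
  rw [PySem.List.slice_from _ (by norm_num)]; rfl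
theorem slice12 (xs : List Char) : PySem.List.slice xs (some 1) (some 2) = (xs.drop 1).take 1 := by
  rw [PySem.List.slice_toNat _ (by norm_num) (by norm_num)]; rfl
theorem slice23 (xs : List Char) : PySem.List.slice xs (some 2) (some 3) = (xs.drop 2).take 1 := by
  rw [PySem.List.slice_toNat _ (by norm_num) (by norm_num)]; rfl
theorem slice34 (xs : List Char) : PySem.List.slice xs (some 3) (some 4) = (xs.drop 3).take 1 := by
  rw [PySem.List.slice_toNat _ (by norm_num) (by norm_num)]; rfl

-- pointwise agreement of the bucket predicates with A's condition, per first char of x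
theorem pointA (x y : String) (hx0 : (x.toList)[0]? = some 'A')
    (hyne : y.toList ≠ []) (hpair : pvPairOK x y) :
    (y.toList.take 1 == ['C'] && y.toList.drop 2 == x.toList.drop 1 ||
        y.toList.take 1 == ['C'] && decide (4 ≤ y.toList.length) && (y.toList)[2]? == (y.toList)[3]? &&
          (y.toList.drop 2).take 1 == (x.toList.drop 1).take 1 ||
      y.toList.take 1 == ['B'] &&
        ((y.toList.drop 1).take 1, (y.toList.drop 3).take 1) ==
          ((x.toList.drop 1).take 1, (x.toList.drop 2).take 1)) = pvQA x y := by
  rcases hy0 : (y.toList)[0]? with _ | d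
  · simp at hy0; simp [hy0] at hyne
  have hytake : y.toList.take 1 = [d] := (take_one_eq_singleton_iff y.toList d).mpr hy0
  unfold pvQA
  rw [if_pos hx0, slice1n, slice2n]
  by_cases hdC : d = 'C'
  · subst hdC
    obtain ⟨hx2, hy3, himp⟩ := hpair.1 hx0 hy0
    rw [if_pos hy0]
    have e1 : ((y.toList.drop 2).take 1 = (x.toList.drop 1).take 1) ↔ ((y.toList)[2]? = (x.toList)[1]?) :=
      take_one_drop_eq_iff _ _ 2 1 (by omega) (by omega)
    rw [Bool.eq_iff_iff]
    simp only [Bool.or_eq_true, Bool.and_eq_true, beq_iff_eq, decide_eq_true_eq, hytake,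
      List.cons.injEq, and_true, true_and, e1]
    constructor
    · rintro ((h | ⟨⟨-, h23⟩, h21⟩) | ⟨hcb, -⟩)
      · exact Or.inl h.symm
      · exact Or.inr ⟨h21.symm, h23⟩
      · exact absurd hcb (by decide)
    · rintro (h | ⟨h1, h2⟩)
      · exact Or.inl (Or.inl h.symm)
      · refine Or.inl (Or.inr ⟨⟨himp h1, h2⟩, h1.symm⟩)
  · by_cases hdB : d = 'B'
    · subst hdB
      obtain ⟨hx2, hy2, himp⟩ := hpair.2.1 hx0 hy0
      rw [if_neg (by simp [hy0]), if_pos hy0]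
      have e1 : ((y.toList.drop 1).take 1 = (x.toList.drop 1).take 1) ↔ ((y.toList)[1]? = (x.toList)[1]?) :=
        take_one_drop_eq_iff _ _ 1 1 (by omega) (by omega)
      rw [Bool.eq_iff_iff]
      simp only [Bool.or_eq_true, Bool.and_eq_true, beq_iff_eq, decide_eq_true_eq, hytake,
        List.cons.injEq, and_true, true_and, Prod.mk.injEq, e1]
      by_cases e : (y.toList)[1]? = (x.toList)[1]?
      · obtain ⟨hx3, hy4⟩ := himp e.symm
        have e2 : ((y.toList.drop 3).take 1 = (x.toList.drop 2).take 1) ↔ ((y.toList)[3]? = (x.toList)[2]?) :=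
          take_one_drop_eq_iff _ _ 3 2 (by omega) (by omega)
        simp only [e2]
        constructor
        · rintro ((⟨hc, -⟩ | ⟨⟨⟨hc, -⟩, -⟩, -⟩) | ⟨-, h2⟩)
          · exact absurd hc (by decide)
          · exact absurd hc (by decide)
          · exact ⟨e.symm, h2.symm⟩
        · rintro ⟨-, h2⟩
          exact Or.inr ⟨e, h2.symm⟩
      · constructor
        · rintro ((⟨hc, -⟩ | ⟨⟨⟨hc, -⟩, -⟩, -⟩) | ⟨h1, -⟩)
          · exact absurd hc (by decide)
          · exact absurd hc (by decide)
          · exact absurd h1 e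
        · rintro ⟨h1, -⟩
          exact absurd h1.symm e
    · rw [if_neg (by simp [hy0, hdC]), if_neg (by simp [hy0, hdB])]
      simp [hytake, hdC, hdB]

theorem pointB (x y : String) (hx0 : (x.toList)[0]? = some 'B')
    (hyne : y.toList ≠ []) (hpair : pvPairOK x y) :
    (y.toList.take 1 == ['C'] &&
        ((y.toList.drop 3).take 1, (y.toList.drop 2).take 1) ==
          ((x.toList.drop 1).take 1, (x.toList.drop 2).take 1) ||
      y.toList.take 1 == ['C'] && y.toList.drop 1 == x.toList.drop 1) = pvQA x y := by
  rcases hy0 : (y.toList)[0]? with _ | d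
  · simp at hy0; simp [hy0] at hyne
  have hytake : y.toList.take 1 = [d] := (take_one_eq_singleton_iff y.toList d).mpr hy0
  unfold pvQA
  rw [if_neg (by simp [hx0]), if_pos hx0, slice1n, slice1n]
  by_cases hdC : d = 'C'
  · subst hdC
    obtain ⟨hx2, hy4, himp⟩ := hpair.2.2 hx0 hy0
    rw [if_pos hy0]
    have e1 : ((y.toList.drop 3).take 1 = (x.toList.drop 1).take 1) ↔ ((y.toList)[3]? = (x.toList)[1]?) :=
      take_one_drop_eq_iff _ _ 3 1 (by omega) (by omega)
    rw [Bool.eq_iff_iff]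
    simp only [Bool.or_eq_true, Bool.and_eq_true, beq_iff_eq, decide_eq_true_eq, hytake,
      true_and, Prod.mk.injEq, e1]
    by_cases e : (y.toList)[3]? = (x.toList)[1]?
    · have hx3 := himp e.symm
      have e2 : ((y.toList.drop 2).take 1 = (x.toList.drop 2).take 1) ↔ ((y.toList)[2]? = (x.toList)[2]?) :=
        take_one_drop_eq_iff _ _ 2 2 (by omega) (by omega)
      simp only [e2]
      constructor
      · rintro (⟨-, h2⟩ | h)
        · exact Or.inl ⟨e.symm, h2.symm⟩
        · exact Or.inr h.symm
      · rintro (⟨-, h2⟩ | h)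
        · exact Or.inl ⟨e, h2.symm⟩
        · exact Or.inr h.symm
    · constructor
      · rintro (⟨h1, -⟩ | h)
        · exact absurd h1 e
        · exact Or.inr h.symm
      · rintro (⟨h1, -⟩ | h)
        · exact absurd h1.symm e
        · exact Or.inr h.symm
  · rw [if_neg (by simp [hy0, hdC])]
    simp [hytake, hdC]

theorem pointC (x y : String) (hx0 : (x.toList)[0]? = some 'C')
    (hyne : y.toList ≠ []) :
    (y.toList.take 1 == ['C'] && y.toList.drop 2 == x.toList.drop 2) = pvQA x y := by
  rcases hy0 : (y.toList)[0]? with _ | d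
  · simp at hy0; simp [hy0] at hyne
  have hytake : y.toList.take 1 = [d] := (take_one_eq_singleton_iff y.toList d).mpr hy0
  unfold pvQA
  rw [if_neg (by simp [hx0]), if_neg (by simp [hx0]), if_pos hx0, slice2n, slice2n]
  by_cases hdC : d = 'C'
  · subst hdC
    rw [if_pos hy0, Bool.eq_iff_iff]
    simp only [Bool.and_eq_true, beq_iff_eq, decide_eq_true_eq, hytake, true_and]
    exact ⟨fun h => h.symm, fun h => h.symm⟩
  · rw [if_neg (by simp [hy0, hdC])]
    simp [hytake, hdC]

theorem pointNone (x y : String) (c : Char) (hx0 : (x.toList)[0]? = some c)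
    (hcA : ¬c = 'A') (hcB : ¬c = 'B') (hcC : ¬c = 'C') : pvQA x y = false := by
  unfold pvQA
  rw [if_neg (by simp [hx0, hcA]), if_neg (by simp [hx0, hcB]), if_neg (by simp [hx0, hcC])]

-- the candidate list B computes for x is exactly A's matches, in index order
theorem pvCands_eq (S : List String) (hPre : Pre_get_dependency_set S) (x : String)
    (hxS : x ∈ S) :
    pvCands (pvBuckets (PySem.List.enumerate S 0)) x =
      (PySem.List.enumerate S 0).filter (fun p => pvQA x p.2) := by
  obtain ⟨hne, hpairs⟩ := hPre x hxS
  rcases hx0 : (x.toList)[0]? with _ | c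
  · rw [List.getElem?_eq_none_iff] at hx0
    simp at hx0
    simp [hx0] at hne
  · have htake : x.toList.take 1 = [c] := (take_one_eq_singleton_iff x.toList c).mpr hx0
    by_cases hcA : c = 'A'
    · subst hcA
      unfold pvCands pvBuckets
      simp only [slice01, slice1n, slice2n, slice12, slice23, slice34, htake]
      rw [if_pos (by simp)]
      rw [pvIndex_getD, pvIndex_getD, pvIndex_getD]
      rw [pvMerge_filter _ _ _ (PySem.List.pairwise_lt_enumerate S 0),
          pvMerge_filter _ _ _ (PySem.List.pairwise_lt_enumerate S 0)]
      apply List.filter_congr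
      intro p hp
      obtain ⟨hyne, -⟩ := hPre p.2 (mem_snd_of_mem_enum S 0 p hp)
      exact pointA x p.2 hx0 hyne (hpairs p.2 (mem_snd_of_mem_enum S 0 p hp))
    · by_cases hcB : c = 'B'
      · subst hcB
        unfold pvCands pvBuckets
        simp only [slice01, slice1n, slice2n, slice12, slice23, slice34, htake]
        rw [if_neg (by simp), if_pos (by simp)]
        rw [pvIndex_getD, pvIndex_getD]
        rw [pvMerge_filter _ _ _ (PySem.List.pairwise_lt_enumerate S 0)]
        apply List.filter_congr
        intro p hp
        obtain ⟨hyne, -⟩ := hPre p.2 (mem_snd_of_mem_enum S 0 p hp)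
        exact pointB x p.2 hx0 hyne (hpairs p.2 (mem_snd_of_mem_enum S 0 p hp))
      · by_cases hcC : c = 'C'
        · subst hcC
          unfold pvCands pvBuckets
          simp only [slice01, slice1n, slice2n, slice12, slice23, slice34, htake]
          rw [if_neg (by simp), if_neg (by simp), if_pos (by simp)]
          rw [pvIndex_getD]
          apply List.filter_congr
          intro p hp
          obtain ⟨hyne, -⟩ := hPre p.2 (mem_snd_of_mem_enum S 0 p hp)
          exact pointC x p.2 hx0 hyne
        · unfold pvCands pvBuckets
          simp only [slice01, slice1n, slice2n, slice12, slice23, slice34, htake]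
          rw [if_neg (by simp [hcA]), if_neg (by simp [hcB]), if_neg (by simp [hcC])]
          symm
          rw [List.filter_eq_nil_iff]
          intro p hp
          simp [pointNone x p.2 c hx0 hcA hcB hcC]

-- ===== VERDICT (by name: the statement is the Claim_ definition above) =====
theorem get_dependency_set_spec : Claim_equal_get_dependency_set := by
  intro S _ hPre
  unfold Spec_get_dependency_set get_dependency_set get_dependency_set_alt
  apply PySem.List.foldl_congr_mem
  intro D x hxS
  have h1 : S.foldl (fun D y => pvStepA D x y) D
      = S.foldl (fun D y => if pvQA x y then aAdd2 D x y else D) D :=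
    PySem.List.foldl_congr_mem _ _ _ _ (fun acc y _ => pvStepA_eq acc x y)
  rw [h1, ← List.foldl_filter, pvCands_eq S hPre x hxS, ← enum_filter_map_snd (fun y => pvQA x y) S 0,
    List.foldl_map]
  rfl
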